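-- pv_equiv track=rewrite | github.com/estimatrixPipiatrix/decision-scientist | key_algos/like_with_like.py | group_like_letters
-- ===== SOURCE A (Python) =====
-- string = "how are you doing today"
--
-- def group_like_letters(string):
--     counts = {}
--     for n in string:
--         if n!=" ":
--             if counts.get(n)==None:
--                 counts.update({n:1})
--             else:
--                 counts.update({n:counts[n]+1})
--
--     groups = []
--     keys = list(counts.keys())
--     for key in keys:
--         num_repeat = counts[key]
--         for i in range(num_repeat):
--             groups.append(key)
--
--     return groups
-- ===== SOURCE B (Python) =====
-- def group_like_letters(string):
--     chars = [c for c in string if c != " "]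
--
--     def grouped(cs):
--         if not cs:
--             return []
--         c = cs[0]
--         return [c] * cs.count(c) + grouped([x for x in cs if x != c])
--
--     return grouped(chars)
-- ===== Notes on version B (the rewrite author's own statement) =====
-- stated objective: simpler
-- what changed: Replaced A's two-phase dict-of-counts build plus key/range replication loops by a short recursive selection: filter out spaces once, then repeatedly emit all copies of the first remaining character and recurse on the list with that character filtered out.
import Mathlib
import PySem

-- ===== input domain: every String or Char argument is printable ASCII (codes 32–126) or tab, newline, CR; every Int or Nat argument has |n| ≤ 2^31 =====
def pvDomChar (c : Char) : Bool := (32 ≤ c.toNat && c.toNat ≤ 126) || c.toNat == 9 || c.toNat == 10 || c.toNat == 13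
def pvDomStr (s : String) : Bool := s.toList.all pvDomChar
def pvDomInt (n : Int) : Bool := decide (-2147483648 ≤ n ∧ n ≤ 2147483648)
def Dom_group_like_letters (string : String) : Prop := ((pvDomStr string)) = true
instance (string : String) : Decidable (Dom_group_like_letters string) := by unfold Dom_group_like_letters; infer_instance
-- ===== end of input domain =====

-- B groups like letters by filtering out spaces once and recursively emitting all copies of the
-- first remaining character, instead of A's dict of counts followed by key/range replication loops
-- (objective: simpler — no measured speed claim).

-- ===== PORT A =====
def group_like_letters (string : String) : List String :=
  let counts : PySem.Dict Char Int :=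
    string.toList.foldl (fun counts n =>
      if n ≠ ' ' then
        if counts.get? n = none then
          counts.insert n 1
        else
          -- counts[n] is present in this branch; (get? …).getD 0 is exact here
          counts.insert n ((counts.get? n).getD 0 + 1)
      else counts) PySem.Dict.empty
  let keys := counts.keys
  keys.foldl (fun groups key =>
    let num_repeat := counts.getD key 0   -- counts[key]: key ∈ keys, so present; getD is exact
    (PySem.List.pyRange 0 num_repeat 1).foldl (fun groups _ => groups ++ [String.mk [key]]) groups) []

-- ===== PORT B =====
def pvGrouped (cs : List Char) : List String :=
  match cs with
  | [] => []
  | c :: rest =>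
    List.replicate ((c :: rest).count c) (String.mk [c]) ++
      pvGrouped ((c :: rest).filter (fun x => decide (x ≠ c)))
termination_by cs.length
decreasing_by
  have h : (c :: rest).filter (fun x => decide (x ≠ c)) = rest.filter (fun x => decide (x ≠ c)) := by
    simp
  rw [h]
  have := List.length_filter_le (fun x => decide (x ≠ c)) rest
  simp only [List.length_cons]
  omega

def group_like_letters_alt (string : String) : List String :=
  let chars := string.toList.filter (fun c => decide (c ≠ ' '))
  pvGrouped chars

-- ===== PRECONDITION & SPEC =====
def Spec_group_like_letters (string : String) (out : List String) : Prop := out = group_like_letters_alt string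
instance (string : String) (out : List String) : Decidable (Spec_group_like_letters string out) := by unfold Spec_group_like_letters; infer_instance

-- ===== CLAIM (what is proved, stated in full; the proofs are below) =====
def Claim_equal_group_like_letters : Prop := ∀ (string : String), Dom_group_like_letters string → Spec_group_like_letters string (group_like_letters string)

-- ===== LEMMAS AND PROOFS =====

-- the common normal form: for each distinct character in first-occurrence order, its count of copies
def pvSpecList (l : List Char) : List String :=
  (PySem.Set.ofList l).flatMap (fun k => List.replicate (l.count k) (String.mk [k]))

theorem pvFlatMap_congr {α β : Type} (l : List α) (f g : α → List β)
    (h : ∀ x ∈ l, f x = g x) : l.flatMap f = l.flatMap g := by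
  induction l with
  | nil => rfl
  | cons a t ih => simp_all [List.flatMap_cons]

-- ----- A-side characterization -----
theorem pvA_eq (string : String) : group_like_letters string = pvSpecList (string.toList.filter (fun c => decide (c ≠ ' '))) := by
  unfold group_like_letters
  dsimp only
  rw [PySem.List.foldl_ite_eq_foldl_filter]
  have hcnt : (string.toList.filter (fun x => decide (x ≠ ' '))).foldl
      (fun counts n =>
        if counts.get? n = none then counts.insert n 1
        else counts.insert n ((counts.get? n).getD 0 + 1)) PySem.Dict.empty
      = PySem.Dict.counter (string.toList.filter (fun x => decide (x ≠ ' '))) := by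
    rw [PySem.Dict.counter_eq_foldl]
    apply PySem.List.foldl_congr_mem
    intro d x _
    by_cases h : d.get? x = none
    · simp [h, PySem.Dict.getD_eq_get?_getD, PySem.Dict.modify]
    · simp [h, PySem.Dict.getD_eq_get?_getD, PySem.Dict.modify]
  rw [hcnt]
  have hout : ∀ (acc : List String) (key : Char),
      key ∈ (PySem.Dict.counter (string.toList.filter (fun x => decide (x ≠ ' ')))).keys →
      (PySem.List.pyRange 0 ((PySem.Dict.counter (string.toList.filter (fun x => decide (x ≠ ' ')))).getD key 0)).foldl
        (fun groups _ => groups ++ [String.mk [key]]) acc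
      = acc ++ List.replicate ((string.toList.filter (fun x => decide (x ≠ ' '))).count key) (String.mk [key]) := by
    intro acc key _
    simp only [PySem.Dict.getD_counter]
    rw [PySem.List.pyRange_one]
    rw [PySem.List.foldl_append_singleton_eq_map (f := fun _ => String.mk [key])]
    simp [Function.comp_def, List.map_const']
  have hrw := PySem.List.foldl_congr_mem _ _ _ ([] : List String) hout
  rw [hrw]
  rw [PySem.List.foldl_append_eq_flatMap]
  simp [pvSpecList, PySem.Dict.keys_counter]

-- ----- B-side characterization -----
theorem pvSet_update_cons {c : Char} : ∀ (m s : List Char), c ∉ m →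
    PySem.Set.update (c :: s) m = c :: PySem.Set.update s m := by
  intro m
  induction m with
  | nil => intro s _; rfl
  | cons x t ih =>
    intro s hm
    have hxc : x ≠ c := fun h => hm (h ▸ List.mem_cons_self ..)
    have : PySem.Set.add (c :: s) x = c :: PySem.Set.add s x := by
      simp only [PySem.Set.add, PySem.Set.contains, List.contains_cons]
      have hb : (x == c) = false := by simp [hxc]
      by_cases hx : x ∈ s <;> simp [hb, hx]
    simp only [PySem.Set.update, List.foldl_cons] at *
    rw [this, ih _ (fun h => hm (List.mem_cons_of_mem _ h))]

theorem pvSet_update_filter {c : Char} : ∀ (m s : List Char), c ∈ s →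
    PySem.Set.update s m = PySem.Set.update s (m.filter (fun x => decide (x ≠ c))) := by
  intro m
  induction m with
  | nil => intro s _; rfl
  | cons x t ih =>
    intro s hc
    by_cases hxc : x = c
    · subst hxc
      have : PySem.Set.add s x = s := by
        simp [PySem.Set.add, PySem.Set.contains, hc]
      simp only [PySem.Set.update, List.foldl_cons, List.filter_cons,
        ne_eq, not_true_eq_false, decide_false] at *
      rw [this]; exact ih s hc
    · have hmem : c ∈ PySem.Set.add s x := by
        simp only [PySem.Set.add]; split
        · exact hc
        · exact List.mem_append_left _ hc
      simp only [PySem.Set.update, List.foldl_cons, List.filter_cons, hxc,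
        ne_eq, decide_true, not_false_eq_true] at *
      exact ih _ hmem

theorem pvSet_ofList_cons (c : Char) (rest : List Char) :
    PySem.Set.ofList (c :: rest) = c :: PySem.Set.ofList (rest.filter (fun x => decide (x ≠ c))) := by
  have h1 : PySem.Set.ofList (c :: rest) = PySem.Set.update [c] rest := rfl
  rw [h1, pvSet_update_filter rest [c] (List.mem_singleton.mpr rfl),
    pvSet_update_cons _ _ (by simp)]
  rfl

theorem pvB_eq : ∀ (l : List Char), pvGrouped l = pvSpecList l := by
  intro l
  induction hn : l.length using Nat.strong_induction_on generalizing l with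
  | _ n ih =>
    match l with
    | [] => rw [pvGrouped]; simp [pvSpecList, PySem.Set.ofList]
    | c :: rest =>
      rw [pvGrouped]
      have hfc : (c :: rest).filter (fun x => decide (x ≠ c)) = rest.filter (fun x => decide (x ≠ c)) := by
        simp
      rw [hfc]
      have hlt : (rest.filter (fun x => decide (x ≠ c))).length < n := by
        have := List.length_filter_le (fun x => decide (x ≠ c)) rest
        simp only [← hn, List.length_cons]; omega
      rw [ih _ hlt _ rfl]
      unfold pvSpecList
      rw [pvSet_ofList_cons, List.flatMap_cons]
      congr 1
      apply pvFlatMap_congr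
      intro k hk
      have hkr : k ∈ rest.filter (fun x => decide (x ≠ c)) := (PySem.Set.mem_ofList _ _).mp hk
      have hkc : k ≠ c := by
        have := List.of_mem_filter hkr
        simpa using this
      rw [List.count_filter (by simp [hkc]), List.count_cons_of_ne (fun h => hkc h.symm)]

-- ===== VERDICT (by name: the statement is the Claim_ definition above) =====
theorem group_like_letters_spec : Claim_equal_group_like_letters := by
  intro string _
  unfold Spec_group_like_letters group_like_letters_alt
  rw [pvA_eq, pvB_eq]
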